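-- pv_equiv track=rewrite | github.com/ljervis/Rosalind_Algorithms | HW4/ManhattanTouristProblem.py | traverseAlignmentGraph
-- ===== SOURCE A (Python) =====
-- def traverseAlignmentGraph(down, right, dim):
--     score = [[0]*(dim[1]+1) for x in range(0,dim[0]+1)]
--     for n in range(1, dim[0]+1):
--         score[n][0] = score[n-1][0]+down[n-1][0]
--     for m in range(1, dim[1]+1):
--         score[0][m] = score[0][m-1]+right[0][m-1]
--     for n in range(1,dim[0]+1):
--         for m in range(1,dim[1]+1):
--             maxVals = [0]*2
--             maxVals[0] = score[n-1][m] + down[n-1][m]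
--             maxVals[1] = score[n][m-1] + right[n][m-1]
--             score[n][m] = max(maxVals)
--     return score
-- ===== SOURCE B (Python) =====
-- def traverseAlignmentGraph(down, right, dim):
--     # Demand-driven: a memoized top-down recursion fills a dictionary of cell
--     # scores; the grid is then read off cell by cell. No mutable 2D table and
--     # no staged border/interior fill loops.
--     memo = {}
--
--     def compute(n, m):
--         cached = memo.get((n, m))
--         if cached is not None:
--             return cached
--         if n == 0 and m == 0:
--             v = 0
--         elif n == 0:
--             v = compute(0, m - 1) + right[0][m - 1]
--         elif m == 0:
--             v = compute(n - 1, 0) + down[n - 1][0]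
--         else:
--             v = max(compute(n - 1, m) + down[n - 1][m],
--                     compute(n, m - 1) + right[n][m - 1])
--         memo[(n, m)] = v
--         return v
--
--     return [[compute(n, m) for m in range(0, dim[1] + 1)]
--             for n in range(0, dim[0] + 1)]
-- ===== Notes on version B (the rewrite author's own statement) =====
-- stated objective: alternative
-- what changed: A fills a pre-allocated 2D table bottom-up with three staged loops (left column, top row, interior); B computes cell scores by demand-driven memoized top-down recursion into a dictionary keyed by (n,m) and reads the grid off cell by cell.
import Mathlib
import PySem

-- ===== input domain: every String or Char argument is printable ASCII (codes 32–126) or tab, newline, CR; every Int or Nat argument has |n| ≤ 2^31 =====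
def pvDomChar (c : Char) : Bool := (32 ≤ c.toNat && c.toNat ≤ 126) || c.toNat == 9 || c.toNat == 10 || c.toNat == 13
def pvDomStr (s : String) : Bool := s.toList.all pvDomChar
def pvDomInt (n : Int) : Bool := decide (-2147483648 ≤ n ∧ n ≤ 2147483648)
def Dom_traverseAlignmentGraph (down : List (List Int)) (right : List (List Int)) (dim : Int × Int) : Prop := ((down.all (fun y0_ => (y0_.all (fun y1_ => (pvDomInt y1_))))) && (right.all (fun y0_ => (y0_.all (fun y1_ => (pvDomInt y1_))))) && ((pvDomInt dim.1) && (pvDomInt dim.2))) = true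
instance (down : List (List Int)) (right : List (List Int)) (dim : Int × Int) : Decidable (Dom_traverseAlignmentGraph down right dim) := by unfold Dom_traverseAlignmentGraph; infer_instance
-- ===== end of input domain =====

-- B replaces A's three staged bottom-up fill loops over a mutable 2D table by a
-- demand-driven memoized top-down recursion into a dictionary; objective:
-- alternative decomposition, same O(N*M) cost.

-- ===== PORT A =====
-- xs[i] where Pre_ guarantees the index is in range (none = IndexError, excluded by Pre_)
def pvCell (xs : List Int) (i : Int) : Int := (PySem.List.pyGet? xs i).getD 0
def pvRow (xss : List (List Int)) (i : Int) : List Int := (PySem.List.pyGet? xss i).getD []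
-- score[i][j] = v with a nonnegative in-range index (all of A's write indices are ≥ 0)
def pvSetCell (xss : List (List Int)) (i j : Int) (v : Int) : List (List Int) :=
  xss.set i.toNat ((pvRow xss i).set j.toNat v)

def traverseAlignmentGraph (down : List (List Int)) (right : List (List Int)) (dim : Int × Int) : List (List Int) :=
  -- score = [[0]*(dim[1]+1) for x in range(0,dim[0]+1)]
  let score := (PySem.List.pyRange 0 (dim.1+1) 1).map (fun _ => List.replicate (dim.2+1).toNat (0:Int))
  -- for n in range(1, dim[0]+1): score[n][0] = score[n-1][0]+down[n-1][0]
  let score := (PySem.List.pyRange 1 (dim.1+1) 1).foldl (fun sc n =>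
      pvSetCell sc n 0 (pvCell (pvRow sc (n-1)) 0 + pvCell (pvRow down (n-1)) 0)) score
  -- for m in range(1, dim[1]+1): score[0][m] = score[0][m-1]+right[0][m-1]
  let score := (PySem.List.pyRange 1 (dim.2+1) 1).foldl (fun sc m =>
      pvSetCell sc 0 m (pvCell (pvRow sc 0) (m-1) + pvCell (pvRow right 0) (m-1))) score
  -- nested loops; max(maxVals) over the two-element list is max v0 v1 (exact for Int)
  (PySem.List.pyRange 1 (dim.1+1) 1).foldl (fun sc n =>
    (PySem.List.pyRange 1 (dim.2+1) 1).foldl (fun sc m =>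
      let v0 := pvCell (pvRow sc (n-1)) m + pvCell (pvRow down (n-1)) m
      let v1 := pvCell (pvRow sc n) (m-1) + pvCell (pvRow right n) (m-1)
      pvSetCell sc n m (max v0 v1)) sc) score

-- ===== PORT B =====
-- B's compute(n, m): n, m come from range(...) so they are ≥ 0, represented as Nat.
-- memo.get((n, m)) → Dict.get?; memo[(n, m)] = v → Dict.insert; the recursion
-- threads the dictionary exactly in Python's left-to-right evaluation order.
def computeB (down : List (List Int)) (right : List (List Int)) :
    (n : Nat) → (m : Nat) → PySem.Dict (Nat × Nat) Int → Int × PySem.Dict (Nat × Nat) Int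
  | n, m, memo =>
    match memo.get? (n, m) with
    | some v => (v, memo)
    | none =>
      match n, m with
      | 0, 0 => (0, memo.insert (0, 0) 0)
      | 0, m+1 =>
          let r := computeB down right 0 m memo
          let v := r.1 + pvCell (pvRow right 0) ((m : Nat) : Int)   -- right[0][m-1]
          (v, r.2.insert (0, m+1) v)
      | n+1, 0 =>
          let r := computeB down right n 0 memo
          let v := r.1 + pvCell (pvRow down ((n : Nat) : Int)) 0    -- down[n-1][0]
          (v, r.2.insert (n+1, 0) v)
      | n+1, m+1 =>
          let r1 := computeB down right n (m+1) memo
          let r2 := computeB down right (n+1) m r1.2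
          let v := max (r1.1 + pvCell (pvRow down ((n : Nat) : Int)) ((m+1 : Nat) : Int))
                       (r2.1 + pvCell (pvRow right ((n+1 : Nat) : Int)) ((m : Nat) : Int))
          (v, r2.2.insert (n+1, m+1) v)
  termination_by n m _ => 2*n + m
  decreasing_by all_goals omega

def traverseAlignmentGraph_alt (down : List (List Int)) (right : List (List Int)) (dim : Int × Int) : List (List Int) :=
  -- [[compute(n, m) for m in range(0, dim[1]+1)] for n in range(0, dim[0]+1)],
  -- threading the memo dictionary through the comprehensions in evaluation order
  ((PySem.List.pyRange 0 (dim.1+1) 1).foldl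
    (fun (acc : List (List Int) × PySem.Dict (Nat × Nat) Int) n =>
      let rm := (PySem.List.pyRange 0 (dim.2+1) 1).foldl
        (fun (rm : List Int × PySem.Dict (Nat × Nat) Int) m =>
          let r := computeB down right n.toNat m.toNat rm.2
          (rm.1 ++ [r.1], r.2)) ([], acc.2)
      (acc.1 ++ [rm.1], rm.2)) ([], PySem.Dict.empty)).1

-- ===== PRECONDITION & SPEC =====
-- Pre_ excludes exactly the inputs on which A raises IndexError: down/right
-- matrices too small for dim, or a negative dimension that makes a border loop
-- index an empty structure.
def Pre_traverseAlignmentGraph (down : List (List Int)) (right : List (List Int)) (dim : Int × Int) : Prop :=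
  (dim.1 < 0 ∧ dim.2 ≤ 0) ∨ (dim.1 = 0 ∧ dim.2 < 0) ∨
  (0 ≤ dim.1 ∧ 0 ≤ dim.2 ∧
  (0 < dim.1 → dim.1.toNat ≤ down.length ∧ ∀ r ∈ down.take dim.1.toNat, dim.2.toNat + 1 ≤ r.length) ∧
  (0 < dim.2 → dim.1.toNat + 1 ≤ right.length ∧ ∀ r ∈ right.take (dim.1.toNat + 1), dim.2.toNat ≤ r.length))
instance (down : List (List Int)) (right : List (List Int)) (dim : Int × Int) : Decidable (Pre_traverseAlignmentGraph down right dim) := by unfold Pre_traverseAlignmentGraph; infer_instance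

def pvWitness_traverseAlignmentGraph : List (List Int) × List (List Int) × (Int × Int) :=
  ([[1, 2], [3, 4]], [[5, 6], [7, 8], [9, 10]], (2, 1))

def Spec_traverseAlignmentGraph (down : List (List Int)) (right : List (List Int)) (dim : Int × Int) (out : List (List Int)) : Prop := out = traverseAlignmentGraph_alt down right dim
instance (down : List (List Int)) (right : List (List Int)) (dim : Int × Int) (out : List (List Int)) : Decidable (Spec_traverseAlignmentGraph down right dim out) := by unfold Spec_traverseAlignmentGraph; infer_instance

-- ===== CLAIM =====
def Claim_equal_traverseAlignmentGraph : Prop := ∀ (down : List (List Int)) (right : List (List Int)) (dim : Int × Int), Dom_traverseAlignmentGraph down right dim → Pre_traverseAlignmentGraph down right dim → Spec_traverseAlignmentGraph down right dim (traverseAlignmentGraph down right dim)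

-- ===== LEMMAS AND PROOFS =====

-- the DP recurrence both programs compute, and the grid of its values
def gcell (xss : List (List Int)) (i j : Nat) : Int := (xss[i]?.getD [])[j]?.getD 0

def dp (down right : List (List Int)) : Nat → Nat → Int
  | 0, 0 => 0
  | 0, m+1 => dp down right 0 m + gcell right 0 m
  | n+1, 0 => dp down right n 0 + gcell down n 0
  | n+1, m+1 => max (dp down right n (m+1) + gcell down n (m+1))
                    (dp down right (n+1) m + gcell right (n+1) m)

def mkGrid (h : Nat → Nat → Int) (N M : Nat) : List (List Int) :=
  (List.range (N+1)).map (fun i => (List.range (M+1)).map (h i))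

theorem pvCell_cast (xs : List Int) (j : Nat) : pvCell xs (j : Int) = xs[j]?.getD 0 := by
  simp [pvCell]

theorem pvRow_cast (xss : List (List Int)) (i : Nat) : pvRow xss (i : Int) = xss[i]?.getD [] := by
  simp [pvRow]

theorem cell_row_cast (xss : List (List Int)) (i j : Nat) :
    pvCell (pvRow xss (i : Int)) (j : Int) = gcell xss i j := by
  simp [pvRow_cast, pvCell_cast, gcell]

theorem read_mkGrid (h : Nat → Nat → Int) (N M i j : Nat) (hi : i ≤ N) (hj : j ≤ M) :
    pvCell (pvRow (mkGrid h N M) (i : Int)) (j : Int) = h i j := by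
  rw [cell_row_cast]
  simp [mkGrid, gcell, hi, hj]

theorem set_map_range {α : Type} (f : Nat → α) (n i : Nat) (v : α) :
    ((List.range n).map f).set i v
      = (List.range n).map (fun a => if a = i then v else f a) := by
  apply List.ext_getElem
  · simp
  · intro k h1 h2
    simp only [List.getElem_set, List.getElem_map, List.getElem_range]
    simp only [List.length_set, List.length_map, List.length_range] at h1
    by_cases hk : i = k
    · subst hk; simp
    · simp [hk, Ne.symm hk]

theorem set_mkGrid (h : Nat → Nat → Int) (N M i j : Nat) (hi : i ≤ N) (_hj : j ≤ M) (v : Int) :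
    pvSetCell (mkGrid h N M) (i : Int) (j : Int) v
      = mkGrid (fun a b => if a = i ∧ b = j then v else h a b) N M := by
  unfold pvSetCell
  rw [pvRow_cast]
  have hrow : (mkGrid h N M)[i]?.getD [] = (List.range (M+1)).map (h i) := by
    simp [mkGrid, hi]
  rw [hrow]
  simp only [Int.toNat_natCast]
  rw [set_map_range, mkGrid, set_map_range]
  apply List.map_congr_left
  intro a _
  by_cases ha : a = i
  · subst ha
    rw [if_pos rfl]
    apply List.map_congr_left
    intro b _
    by_cases hb : b = j <;> simp [hb]
  · simp only [if_neg ha]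
    apply List.map_congr_left
    intro b _
    simp [ha]

theorem mkGrid_congr (h h' : Nat → Nat → Int) (N M : Nat)
    (H : ∀ a ≤ N, ∀ b ≤ M, h a b = h' a b) : mkGrid h N M = mkGrid h' N M := by
  unfold mkGrid
  apply List.map_congr_left
  intro a ha
  apply List.map_congr_left
  intro b hb
  exact H a (by simpa using Nat.lt_succ_iff.mp (List.mem_range.mp ha))
          b (by simpa using Nat.lt_succ_iff.mp (List.mem_range.mp hb))

theorem read_mkGrid' (h : Nat → Nat → Int) (N M : Nat) (i j : Int) (i' j' : Nat)
    (hi : i = i') (hj : j = j') (hi' : i' ≤ N) (hj' : j' ≤ M) :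
    pvCell (pvRow (mkGrid h N M) i) j = h i' j' := by
  subst hi hj; exact read_mkGrid h N M i' j' hi' hj'

theorem set_mkGrid' (h : Nat → Nat → Int) (N M : Nat) (i j : Int) (v : Int) (i' j' : Nat)
    (hi : i = i') (hj : j = j') (hi' : i' ≤ N) (hj' : j' ≤ M) :
    pvSetCell (mkGrid h N M) i j v
      = mkGrid (fun a b => if a = i' ∧ b = j' then v else h a b) N M := by
  subst hi hj; exact set_mkGrid h N M i' j' hi' hj' v

theorem cell_row_cast' (xss : List (List Int)) (i j : Int) (i' j' : Nat)
    (hi : i = i') (hj : j = j') : pvCell (pvRow xss i) j = gcell xss i' j' := by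
  subst hi hj; exact cell_row_cast xss i' j'

theorem phase1 (down right : List (List Int)) (N M : Nat) : ∀ k, k ≤ N →
    (List.range k).foldl (fun sc (kk : Nat) =>
        pvSetCell sc (1+(kk:Int)) 0
          (pvCell (pvRow sc ((1+(kk:Int))-1)) 0 + pvCell (pvRow down ((1+(kk:Int))-1)) 0))
      (mkGrid (fun _ _ => 0) N M)
    = mkGrid (fun a b => if b = 0 ∧ a ≤ k then dp down right a 0 else 0) N M := by
  intro k hk
  induction k with
  | zero =>
      simp only [List.range_zero, List.foldl_nil]
      apply mkGrid_congr; intro a _ b _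
      by_cases h : b = 0 ∧ a ≤ 0
      · obtain ⟨rfl, ha⟩ := h
        interval_cases a
        simp [dp]
      · rw [if_neg h]
  | succ k ih =>
      rw [List.range_succ, List.foldl_append, ih (by omega), List.foldl_cons, List.foldl_nil]
      rw [read_mkGrid' _ N M _ _ k 0 (by omega) (by norm_num) (by omega) (by omega)]
      rw [cell_row_cast' down _ _ k 0 (by omega) (by norm_num)]
      rw [set_mkGrid' _ N M _ _ _ (k+1) 0 (by omega) (by norm_num) (by omega) (by omega)]
      apply mkGrid_congr; intro a _ b _
      by_cases hab : a = k + 1 ∧ b = 0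
      · obtain ⟨rfl, rfl⟩ := hab
        simp [dp]
      · rw [if_neg hab]
        by_cases h1 : b = 0 ∧ a ≤ k
        · rw [if_pos h1, if_pos (by omega)]
        · rw [if_neg h1, if_neg (by omega)]

theorem phase2 (down right : List (List Int)) (N M : Nat) : ∀ k, k ≤ M →
    (List.range k).foldl (fun sc (kk : Nat) =>
        pvSetCell sc 0 (1+(kk:Int))
          (pvCell (pvRow sc 0) ((1+(kk:Int))-1) + pvCell (pvRow right 0) ((1+(kk:Int))-1)))
      (mkGrid (fun a b => if b = 0 ∧ a ≤ N then dp down right a 0 else 0) N M)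
    = mkGrid (fun a b => if b = 0 ∧ a ≤ N then dp down right a 0
              else if a = 0 ∧ b ≤ k then dp down right 0 b else 0) N M := by
  intro k hk
  induction k with
  | zero =>
      simp only [List.range_zero, List.foldl_nil]
      apply mkGrid_congr; intro a ha b _
      by_cases h : b = 0 ∧ a ≤ N
      · rw [if_pos h, if_pos h]
      · rw [if_neg h, if_neg h, if_neg (by omega)]
  | succ k ih =>
      rw [List.range_succ, List.foldl_append, ih (by omega), List.foldl_cons, List.foldl_nil]
      rw [read_mkGrid' _ N M _ _ 0 k (by norm_num) (by omega) (by omega) (by omega)]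
      rw [cell_row_cast' right _ _ 0 k (by norm_num) (by omega)]
      rw [set_mkGrid' _ N M _ _ _ 0 (k+1) (by norm_num) (by omega) (by omega) (by omega)]
      have hread : (if k = 0 ∧ 0 ≤ N then dp down right 0 0
                    else if 0 = 0 ∧ k ≤ k then dp down right 0 k else 0) = dp down right 0 k := by
        by_cases hk0 : k = 0
        · subst hk0; simp
        · simp [hk0]
      rw [hread]
      apply mkGrid_congr; intro a _ b _
      by_cases hab : a = 0 ∧ b = k + 1
      · obtain ⟨rfl, rfl⟩ := hab
        rw [if_pos ⟨rfl, rfl⟩, if_neg (by omega), if_pos (by omega)]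
        simp [dp]
      · rw [if_neg hab]
        by_cases h1 : b = 0 ∧ a ≤ N
        · rw [if_pos h1, if_pos h1]
        · rw [if_neg h1, if_neg h1]
          by_cases h2 : a = 0 ∧ b ≤ k
          · rw [if_pos h2, if_pos (by omega)]
          · rw [if_neg h2, if_neg (by omega)]

def pvF (down right : List (List Int)) (n : Nat) : Nat → Nat → Int :=
  fun a b => if a ≤ n ∨ b = 0 then dp down right a b else 0

def pvG (down right : List (List Int)) (k j : Nat) : Nat → Nat → Int :=
  fun a b => if a ≤ k ∨ b = 0 ∨ (a = k+1 ∧ b ≤ j) then dp down right a b else 0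

theorem phase3_inner (down right : List (List Int)) (N M : Nat) (k : Nat) (hk : k < N) :
    ∀ j, j ≤ M →
    (List.range j).foldl (fun sc (kk : Nat) =>
        pvSetCell sc (1+(k:Int)) (1+(kk:Int))
          (max (pvCell (pvRow sc ((1+(k:Int))-1)) (1+(kk:Int)) +
                pvCell (pvRow down ((1+(k:Int))-1)) (1+(kk:Int)))
               (pvCell (pvRow sc (1+(k:Int))) ((1+(kk:Int))-1) +
                pvCell (pvRow right (1+(k:Int))) ((1+(kk:Int))-1))))
      (mkGrid (pvF down right k) N M)
    = mkGrid (pvG down right k j) N M := by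
  intro j hj
  induction j with
  | zero =>
      simp only [List.range_zero, List.foldl_nil]
      apply mkGrid_congr; intro a _ b _
      unfold pvF pvG
      by_cases h : a ≤ k ∨ b = 0
      · rw [if_pos h, if_pos (by omega)]
      · rw [if_neg h, if_neg (by omega)]
  | succ j ih =>
      rw [List.range_succ, List.foldl_append, ih (by omega), List.foldl_cons, List.foldl_nil]
      rw [read_mkGrid' _ N M _ _ k (j+1) (by omega) (by omega) (by omega) (by omega)]
      rw [cell_row_cast' down _ _ k (j+1) (by omega) (by omega)]
      rw [read_mkGrid' _ N M _ _ (k+1) j (by omega) (by omega) (by omega) (by omega)]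
      rw [cell_row_cast' right _ _ (k+1) j (by omega) (by omega)]
      rw [set_mkGrid' _ N M _ _ _ (k+1) (j+1) (by omega) (by omega) (by omega) (by omega)]
      have h1 : pvG down right k j k (j+1) = dp down right k (j+1) := by
        unfold pvG; rw [if_pos (by omega)]
      have h2 : pvG down right k j (k+1) j = dp down right (k+1) j := by
        unfold pvG
        by_cases hj0 : j = 0
        · subst hj0; rw [if_pos (by omega)]
        · rw [if_pos (by omega)]
      rw [h1, h2]
      apply mkGrid_congr; intro a _ b _
      unfold pvG
      by_cases hab : a = k + 1 ∧ b = j + 1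
      · obtain ⟨rfl, rfl⟩ := hab
        rw [if_pos ⟨rfl, rfl⟩, if_pos (by omega)]
        simp [dp]
      · rw [if_neg hab]
        by_cases h : a ≤ k ∨ b = 0 ∨ (a = k+1 ∧ b ≤ j)
        · rw [if_pos h, if_pos (by omega)]
        · rw [if_neg h, if_neg (by omega)]

theorem phase3_outer (down right : List (List Int)) (N M : Nat) : ∀ k, k ≤ N →
    (List.range k).foldl (fun sc (ko : Nat) =>
        (List.range M).foldl (fun sc (kk : Nat) =>
          pvSetCell sc (1+(ko:Int)) (1+(kk:Int))
            (max (pvCell (pvRow sc ((1+(ko:Int))-1)) (1+(kk:Int)) +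
                  pvCell (pvRow down ((1+(ko:Int))-1)) (1+(kk:Int)))
                 (pvCell (pvRow sc (1+(ko:Int))) ((1+(kk:Int))-1) +
                  pvCell (pvRow right (1+(ko:Int))) ((1+(kk:Int))-1)))) sc)
      (mkGrid (pvF down right 0) N M)
    = mkGrid (pvF down right k) N M := by
  intro k hk
  induction k with
  | zero => simp
  | succ k ih =>
      rw [List.range_succ, List.foldl_append, ih (by omega), List.foldl_cons, List.foldl_nil]
      rw [phase3_inner down right N M k (by omega) M le_rfl]
      apply mkGrid_congr; intro a _ b hb
      unfold pvF pvG
      by_cases h : a ≤ k ∨ b = 0 ∨ (a = k+1 ∧ b ≤ M)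
      · rw [if_pos h, if_pos (by omega)]
      · rw [if_neg h, if_neg (by omega)]

theorem portA_eq_grid (down right : List (List Int)) (N M : Nat) :
    traverseAlignmentGraph down right ((N : Int), (M : Int)) = mkGrid (dp down right) N M := by
  have e1 : ((N:Int)+1-0).toNat = N+1 := by omega
  have e2 : ((N:Int)+1-1).toNat = N := by omega
  have e3 : ((M:Int)+1-1).toNat = M := by omega
  have e4 : ((M:Int)+1).toNat = M+1 := by omega
  unfold traverseAlignmentGraph
  simp only [PySem.List.pyRange_one, e1, e2, e3, e4, List.foldl_map, List.map_map]
  have hinit : List.map ((fun _ => List.replicate (M+1) (0:Int)) ∘ fun k : Nat => (0:Int) + ↑k)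
      (List.range (N+1)) = mkGrid (fun _ _ => 0) N M := by
    simp [mkGrid, Function.comp_def, List.map_const']
  rw [hinit, phase1 down right N M N le_rfl, phase2 down right N M M le_rfl]
  have bridge : mkGrid (fun a b => if b = 0 ∧ a ≤ N then dp down right a 0
      else if a = 0 ∧ b ≤ M then dp down right 0 b else 0) N M
      = mkGrid (pvF down right 0) N M := by
    apply mkGrid_congr; intro a ha b hb
    unfold pvF
    by_cases h1 : b = 0 ∧ a ≤ N
    · obtain ⟨rfl, haN⟩ := h1
      rw [if_pos ⟨rfl, haN⟩, if_pos (by omega)]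
    · rw [if_neg h1]
      by_cases h2 : a = 0 ∧ b ≤ M
      · obtain ⟨rfl, -⟩ := h2
        rw [if_pos (by omega), if_pos (by omega)]
      · rw [if_neg h2, if_neg (by omega)]
  rw [bridge, phase3_outer down right N M N le_rfl]
  apply mkGrid_congr; intro a ha b _
  unfold pvF
  rw [if_pos (Or.inl ha)]

-- ===== B-side proofs: the memoized recursion computes dp =====

def MemoInv (down right : List (List Int)) (memo : PySem.Dict (Nat × Nat) Int) : Prop :=
  ∀ p v, memo.get? p = some v → v = dp down right p.1 p.2

theorem memoInv_insert (down right : List (List Int)) (memo : PySem.Dict (Nat × Nat) Int)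
    (n m : Nat) (h : MemoInv down right memo) :
    MemoInv down right (memo.insert (n, m) (dp down right n m)) := by
  intro p v hv
  rw [PySem.Dict.get?_insert] at hv
  by_cases hp : p = (n, m)
  · rw [if_pos hp] at hv
    cases hv; subst hp; rfl
  · rw [if_neg hp] at hv
    exact h p v hv

theorem computeB_correct (down right : List (List Int)) :
    ∀ (n m : Nat) (memo : PySem.Dict (Nat × Nat) Int), MemoInv down right memo →
    (computeB down right n m memo).1 = dp down right n m ∧
    MemoInv down right (computeB down right n m memo).2 := by
  intro n m
  induction n, m using dp.induct with
  | case1 =>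
      intro memo hInv
      rw [computeB]
      cases hc : memo.get? (0, 0) with
      | some v => exact ⟨hInv _ v hc, hInv⟩
      | none =>
          refine ⟨by simp [dp], ?_⟩
          simpa [dp] using memoInv_insert down right memo 0 0 hInv
  | case2 m ih =>
      intro memo hInv
      rw [computeB]
      cases hc : memo.get? (0, m+1) with
      | some v => exact ⟨hInv _ v hc, hInv⟩
      | none =>
          obtain ⟨h1, h2⟩ := ih memo hInv
          have hv : (computeB down right 0 m memo).1 + pvCell (pvRow right 0) ((m : Nat) : Int)
              = dp down right 0 (m+1) := by
            rw [h1, cell_row_cast' right _ _ 0 m (by norm_num) rfl]; simp [dp]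
          simp only []
          refine ⟨hv, ?_⟩
          have := memoInv_insert down right (computeB down right 0 m memo).2 0 (m+1) h2
          rwa [← hv] at this
  | case3 n ih =>
      intro memo hInv
      rw [computeB]
      cases hc : memo.get? (n+1, 0) with
      | some v => exact ⟨hInv _ v hc, hInv⟩
      | none =>
          obtain ⟨h1, h2⟩ := ih memo hInv
          have hv : (computeB down right n 0 memo).1 + pvCell (pvRow down ((n : Nat) : Int)) 0
              = dp down right (n+1) 0 := by
            rw [h1]
            rw [cell_row_cast' down _ _ n 0 rfl (by norm_num)]
            simp [dp]
          simp only []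
          refine ⟨hv, ?_⟩
          have := memoInv_insert down right (computeB down right n 0 memo).2 (n+1) 0 h2
          rwa [← hv] at this
  | case4 n m ih1 ih2 =>
      intro memo hInv
      rw [computeB]
      cases hc : memo.get? (n+1, m+1) with
      | some v => exact ⟨hInv _ v hc, hInv⟩
      | none =>
          obtain ⟨h1, h2⟩ := ih1 memo hInv
          obtain ⟨h3, h4⟩ := ih2 (computeB down right n (m+1) memo).2 h2
          have hv : max ((computeB down right n (m+1) memo).1 +
                          pvCell (pvRow down ((n : Nat) : Int)) ((m+1 : Nat) : Int))
                        ((computeB down right (n+1) m (computeB down right n (m+1) memo).2).1 +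
                          pvCell (pvRow right ((n+1 : Nat) : Int)) ((m : Nat) : Int))
              = dp down right (n+1) (m+1) := by
            rw [h1, h3,
                cell_row_cast' down _ _ n (m+1) rfl rfl,
                cell_row_cast' right _ _ (n+1) m rfl rfl]
            simp [dp]
          simp only []
          refine ⟨hv, ?_⟩
          have := memoInv_insert down right
            (computeB down right (n+1) m (computeB down right n (m+1) memo).2).2 (n+1) (m+1) h4
          rwa [← hv] at this

theorem innerB (down right : List (List Int)) (n : Nat) :
    ∀ (k : Nat) (memo : PySem.Dict (Nat × Nat) Int), MemoInv down right memo →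
    ((List.range k).foldl (fun (rm : List Int × PySem.Dict (Nat × Nat) Int) (m : Nat) =>
        let r := computeB down right n m rm.2
        (rm.1 ++ [r.1], r.2)) ([], memo)).1 = (List.range k).map (dp down right n) ∧
    MemoInv down right ((List.range k).foldl (fun (rm : List Int × PySem.Dict (Nat × Nat) Int) (m : Nat) =>
        let r := computeB down right n m rm.2
        (rm.1 ++ [r.1], r.2)) ([], memo)).2 := by
  intro k memo hInv
  -- generalize the accumulator
  suffices H : ∀ (k : Nat) (acc : List Int) (memo : PySem.Dict (Nat × Nat) Int), MemoInv down right memo →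
      ((List.range k).foldl (fun (rm : List Int × PySem.Dict (Nat × Nat) Int) (m : Nat) =>
          let r := computeB down right n m rm.2
          (rm.1 ++ [r.1], r.2)) (acc, memo)).1 = acc ++ (List.range k).map (dp down right n) ∧
      MemoInv down right ((List.range k).foldl (fun (rm : List Int × PySem.Dict (Nat × Nat) Int) (m : Nat) =>
          let r := computeB down right n m rm.2
          (rm.1 ++ [r.1], r.2)) (acc, memo)).2 by
    simpa using H k [] memo hInv
  intro k
  induction k with
  | zero => intro acc memo hInv; simpa using hInv
  | succ k ih =>
      intro acc memo hInv
      rw [List.range_succ, List.foldl_append, List.foldl_cons, List.foldl_nil]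
      obtain ⟨h1, h2⟩ := ih acc memo hInv
      obtain ⟨c1, c2⟩ := computeB_correct down right n k _ h2
      exact ⟨by simp [h1, c1], c2⟩

theorem memoInv_empty (down right : List (List Int)) :
    MemoInv down right PySem.Dict.empty := by
  intro p v hv
  rw [PySem.Dict.get?_empty] at hv
  cases hv

theorem outerB (down right : List (List Int)) (M : Nat) :
    ∀ (k : Nat) (acc : List (List Int)) (memo : PySem.Dict (Nat × Nat) Int), MemoInv down right memo →
    ((List.range k).foldl (fun (acc : List (List Int) × PySem.Dict (Nat × Nat) Int) (n : Nat) =>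
        let rm := (List.range (M+1)).foldl (fun (rm : List Int × PySem.Dict (Nat × Nat) Int) (m : Nat) =>
            let r := computeB down right n m rm.2
            (rm.1 ++ [r.1], r.2)) ([], acc.2)
        (acc.1 ++ [rm.1], rm.2)) (acc, memo)).1
      = acc ++ (List.range k).map (fun n => (List.range (M+1)).map (dp down right n)) ∧
    MemoInv down right
    ((List.range k).foldl (fun (acc : List (List Int) × PySem.Dict (Nat × Nat) Int) (n : Nat) =>
        let rm := (List.range (M+1)).foldl (fun (rm : List Int × PySem.Dict (Nat × Nat) Int) (m : Nat) =>
            let r := computeB down right n m rm.2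
            (rm.1 ++ [r.1], r.2)) ([], acc.2)
        (acc.1 ++ [rm.1], rm.2)) (acc, memo)).2 := by
  intro k
  induction k with
  | zero => intro acc memo hInv; simpa using hInv
  | succ k ih =>
      intro acc memo hInv
      rw [show List.range (k+1) = List.range k ++ [k] from List.range_succ,
          List.foldl_append, List.foldl_cons, List.foldl_nil]
      obtain ⟨h1, h2⟩ := ih acc memo hInv
      obtain ⟨c1, c2⟩ := innerB down right k (M+1) _ h2
      exact ⟨by simp [h1, c1], c2⟩

theorem portB_eq_grid (down right : List (List Int)) (N M : Nat) :
    traverseAlignmentGraph_alt down right ((N : Int), (M : Int)) = mkGrid (dp down right) N M := by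
  have e0 : ((N:Int)+1-0).toNat = N+1 := by omega
  have e4 : ((M:Int)+1-0).toNat = M+1 := by omega
  unfold traverseAlignmentGraph_alt
  simp only [PySem.List.pyRange_one, e0, e4, List.foldl_map, zero_add, Int.toNat_natCast]
  have h := outerB down right M (N+1) [] PySem.Dict.empty (memoInv_empty down right)
  simpa [mkGrid] using h.1

theorem ports_eq_neg (down right : List (List Int)) (d1 d2 : Int) (hn : d1 < 0) (hm : d2 ≤ 0) :
    traverseAlignmentGraph down right (d1, d2) = traverseAlignmentGraph_alt down right (d1, d2) := by
  unfold traverseAlignmentGraph traverseAlignmentGraph_alt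
  rw [show PySem.List.pyRange 0 (d1+1) 1 = [] from PySem.List.pyRange_one_eq_nil (by omega),
      show PySem.List.pyRange 1 (d1+1) 1 = [] from PySem.List.pyRange_one_eq_nil (by omega),
      show PySem.List.pyRange 1 (d2+1) 1 = [] from PySem.List.pyRange_one_eq_nil (by omega)]
  simp

theorem ports_eq_zero_neg (down right : List (List Int)) (d2 : Int) (hm : d2 < 0) :
    traverseAlignmentGraph down right (0, d2) = traverseAlignmentGraph_alt down right (0, d2) := by
  unfold traverseAlignmentGraph traverseAlignmentGraph_alt
  rw [show PySem.List.pyRange 0 (0+1) 1 = [0] from PySem.List.pyRange_one_singleton 0,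
      show PySem.List.pyRange 1 (0+1) 1 = [] from PySem.List.pyRange_one_eq_nil (by omega),
      show PySem.List.pyRange 1 (d2+1) 1 = [] from PySem.List.pyRange_one_eq_nil (by omega),
      show PySem.List.pyRange 0 (d2+1) 1 = [] from PySem.List.pyRange_one_eq_nil (by omega)]
  simp [show (d2+1).toNat = 0 by omega]

-- ===== VERDICT (by name: the statement is the Claim_ definition above) =====
theorem traverseAlignmentGraph_spec : Claim_equal_traverseAlignmentGraph := by
  intro down right dim hDom hPre
  obtain ⟨d1, d2⟩ := dim
  unfold Spec_traverseAlignmentGraph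
  rcases hPre with ⟨hn, hm⟩ | ⟨h0, hm⟩ | ⟨h1, h2, -, -⟩
  · exact ports_eq_neg down right d1 d2 hn hm
  · subst h0; exact ports_eq_zero_neg down right d2 hm
  · obtain ⟨N, rfl⟩ := Int.eq_ofNat_of_zero_le h1
    obtain ⟨M, rfl⟩ := Int.eq_ofNat_of_zero_le h2
    rw [portA_eq_grid, portB_eq_grid]
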